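-- pv_equiv track=rewrite | github.com/janpab/algorytmy | dane/61/program.py | is_artmetyczny
-- ===== SOURCE A (Python) =====
-- def is_artmetyczny(number):
--     is_artmetyczny = True
--     roznice = []
--     for i in range(0, len(number)-1):
--         roznice.append(int(number[i])-int(number[i+1]))
--     for i in range(len(roznice)):
--         if roznice[0]==roznice[i]:
--             is_artmetyczny = True
--         else:
--             is_artmetyczny=False
--             break
--     return is_artmetyczny
-- ===== SOURCE B (Python) =====
-- def is_artmetyczny(number):
--     if len(number) < 2:
--         return True
--     d = int(number[0]) - int(number[1])
--     prev = int(number[0])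
--     for s in number[1:]:
--         cur = int(s)
--         if prev - cur != d:
--             return False
--         prev = cur
--     return True
-- ===== Notes on version B (the rewrite author's own statement) =====
-- stated objective: simpler
-- what changed: B replaces A's two index-based passes (build a difference list, then scan it with a flag and break) by one early-exit scan over the list itself carrying the previous parsed value; no intermediate list and no indexing.
import Mathlib
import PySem

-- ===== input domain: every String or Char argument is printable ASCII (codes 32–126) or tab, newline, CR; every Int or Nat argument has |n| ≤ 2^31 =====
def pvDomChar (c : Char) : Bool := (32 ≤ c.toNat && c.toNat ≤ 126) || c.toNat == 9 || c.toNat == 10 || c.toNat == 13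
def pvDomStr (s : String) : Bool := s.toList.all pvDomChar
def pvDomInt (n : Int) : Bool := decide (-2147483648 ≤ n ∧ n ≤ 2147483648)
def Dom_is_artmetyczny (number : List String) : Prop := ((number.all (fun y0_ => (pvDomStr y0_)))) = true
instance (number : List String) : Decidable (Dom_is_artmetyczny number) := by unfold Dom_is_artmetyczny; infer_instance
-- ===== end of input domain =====

-- B changes A's two index-based passes into one early-exit scan carrying the previous value; objective: simpler.
-- ===== PORT A =====
-- int(s); total stand-in: under Pre_ every int() call succeeds, so getD 0 is never the observed value
def pvInt (s : String) : Int := (PySem.Int.ofStr? s).getD 0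

-- the second Python loop (flag + break): recursion over the index list, early exit on mismatch
def aLoop (r : List Int) : List Int → Bool
  | [] => true
  | i :: rest =>
      if PySem.List.pyGetD r 0 0 == PySem.List.pyGetD r i 0 then aLoop r rest else false

def is_artmetyczny (number : List String) : Bool :=
  let roznice := (PySem.List.pyRange 0 ((number.length : Int) - 1) 1).foldl
      (fun acc i =>
        acc ++ [pvInt (PySem.List.pyGetD number i "") - pvInt (PySem.List.pyGetD number (i + 1) "")]) []
  aLoop roznice (PySem.List.pyRange 0 (roznice.length : Int) 1)

-- ===== PORT B =====
-- the single for-loop of B: d and prev carried, early return False on mismatch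
def bLoop (d prev : Int) : List String → Bool
  | [] => true
  | s :: rest =>
      let cur := pvInt s
      if prev - cur != d then false else bLoop d cur rest

def is_artmetyczny_alt (number : List String) : Bool :=
  match number with
  | [] => true
  | [_] => true
  | a :: b :: rest => bLoop (pvInt a - pvInt b) (pvInt a) (b :: rest)

-- ===== PRECONDITION & SPEC =====
-- Pre_ excludes exactly the inputs where Python's int() raises ValueError (A calls int on every
-- element whenever the list has at least two elements; with fewer it calls int not at all).
def Pre_is_artmetyczny (number : List String) : Prop :=
  number.length < 2 ∨ ∀ s ∈ number, (PySem.Int.ofStr? s).isSome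
instance (number : List String) : Decidable (Pre_is_artmetyczny number) := by
  unfold Pre_is_artmetyczny; infer_instance

def pvWitness_is_artmetyczny : List String := ["1", "3", "5"]

def Spec_is_artmetyczny (number : List String) (out : Bool) : Prop := out = is_artmetyczny_alt number
instance (number : List String) (out : Bool) : Decidable (Spec_is_artmetyczny number out) := by
  unfold Spec_is_artmetyczny; infer_instance

-- ===== CLAIM (what is proved, stated in full; the proofs are below) =====
def Claim_equal_is_artmetyczny : Prop :=
  ∀ (number : List String), Dom_is_artmetyczny number → Pre_is_artmetyczny number →
    Spec_is_artmetyczny number (is_artmetyczny number)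

-- ===== LEMMAS AND PROOFS =====

-- the list of adjacent differences, structurally
def diffsOf : List String → List Int
  | a :: b :: t => (pvInt a - pvInt b) :: diffsOf (b :: t)
  | _ => []

theorem diffsOf_eq_zipWith (l : List String) :
    diffsOf l = List.zipWith (fun a b => pvInt a - pvInt b) l l.tail := by
  induction l with
  | nil => rfl
  | cons a t ih =>
      cases t with
      | nil => rfl
      | cons b t' => simp [diffsOf, ih]

-- A's first loop builds diffsOf
theorem roznice_eq (number : List String) :
    (PySem.List.pyRange 0 ((number.length : Int) - 1) 1).foldl
      (fun acc i =>
        acc ++ [pvInt (PySem.List.pyGetD number i "") - pvInt (PySem.List.pyGetD number (i + 1) "")]) []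
      = diffsOf number := by
  rw [PySem.List.foldl_append_singleton_eq_map, PySem.List.pyRange_one, diffsOf_eq_zipWith]
  apply List.ext_getElem
  · cases number <;> simp
  · intro k h1 h2
    simp only [List.nil_append, List.getElem_map, List.getElem_range, List.getElem_zipWith]
    have hk : k < number.length - 1 := by
      simpa using h1
    have hkl : k < number.length := by omega
    have hkl1 : k + 1 < number.length := by omega
    have e0 : PySem.List.pyGetD number ((0 : Int) + (k : Int)) "" = number[k] := by
      rw [PySem.List.pyGetD_eq_getElem]
      · simp
      · omega
      · omega
    have e1 : PySem.List.pyGetD number ((0 : Int) + (k : Int) + 1) "" = number[k + 1] := by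
      rw [PySem.List.pyGetD_eq_getElem]
      · simp
      · omega
      · omega
    rw [e0, e1]
    congr 1
    simp [List.getElem_tail]

-- A's second loop over indices j, j+1, …, r.length-1 checks r[j..] against r[0]
theorem aLoop_range (r : List Int) (j : Nat) :
    aLoop r (PySem.List.pyRange (j : Int) (r.length : Int) 1)
      = (r.drop j).all (fun x => PySem.List.pyGetD r 0 0 == x) := by
  by_cases h : j < r.length
  · rw [PySem.List.pyRange_one_cons (by exact_mod_cast h)]
    have hjr : PySem.List.pyGetD r (j : Int) 0 = r[j] := by
      rw [PySem.List.pyGetD_eq_getElem] <;> simp [h]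
    have hdrop : r.drop j = r[j] :: r.drop (j + 1) := List.drop_eq_getElem_cons h
    rw [aLoop, hjr, hdrop]
    have ih := aLoop_range r (j + 1)
    push_cast at ih
    rw [ih, List.all_cons]
    by_cases hc : PySem.List.pyGetD r 0 0 = r[j] <;> simp [hc]
  · rw [PySem.List.pyRange_one_eq_nil (by exact_mod_cast Nat.le_of_not_lt h)]
    rw [List.drop_eq_nil_of_le (Nat.le_of_not_lt h)]
    rfl
termination_by r.length - j

-- B's loop checks all later differences against d
theorem bLoop_eq (d : Int) (a : String) (l : List String) :
    bLoop d (pvInt a) l = (diffsOf (a :: l)).all (fun x => x == d) := by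
  induction l generalizing a with
  | nil => rfl
  | cons s t ih =>
      by_cases hc : pvInt a - pvInt s = d
      · simp [bLoop, diffsOf, hc, ih]
      · simp [bLoop, diffsOf, hc]

theorem is_artmetyczny_eq_all (number : List String) :
    is_artmetyczny number
      = (diffsOf number).all (fun x => PySem.List.pyGetD (diffsOf number) 0 0 == x) := by
  unfold is_artmetyczny
  simp only [roznice_eq]
  have := aLoop_range (diffsOf number) 0
  simpa using this

-- ===== VERDICT (by name: the statement is the Claim_ definition above) =====
theorem is_artmetyczny_spec : Claim_equal_is_artmetyczny := by
  intro number _ _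
  unfold Spec_is_artmetyczny
  rw [is_artmetyczny_eq_all]
  match number with
  | [] => rfl
  | [_] => rfl
  | a :: b :: rest =>
      rw [show is_artmetyczny_alt (a :: b :: rest)
            = bLoop (pvInt a - pvInt b) (pvInt a) (b :: rest) from rfl,
          bLoop_eq]
      have hd : diffsOf (a :: b :: rest) = (pvInt a - pvInt b) :: diffsOf (b :: rest) := rfl
      rw [hd]
      simp only [List.all_cons, PySem.List.pyGetD_zero_cons]
      have : ∀ x : Int, ((pvInt a - pvInt b) == x) = (x == (pvInt a - pvInt b)) := by
        intro x; by_cases h : x = pvInt a - pvInt b <;> simp [h, eq_comm]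
      simp [this]
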